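-- pv_equiv track=rewrite | github.com/vladajankovic/Simulacija-Telekomunikacionog-Kanala | simulation.py | majority_decision
-- ===== SOURCE A (Python) =====
-- def majority_decision(n, array, bitgroup):
--     output = []
--     ones = 0
--     count = 0
--     for bit in array:
--         if bit == '1':
--             ones += 1
--         count += 1
--         if count == n:
--             out = '1' if ones > n / 2 else '0'
--             output.append(out)
--             ones = 0
--             count = 0
--     g = 0
--     st = ""
--     tmp = []
--     for out in output:
--         st = st + out
--         g += 1
--         if g == bitgroup:
--             tmp.append(st)
--             st = ""
--             g = 0
--     return tmp
-- ===== SOURCE B (Python) =====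
-- def majority_decision(n, array, bitgroup):
--     # Single fused nested pass over super-blocks of n*bitgroup bits,
--     # instead of A's two sequential stateful passes.
--     if n <= 0 or bitgroup <= 0:
--         return []
--     size = n * bitgroup
--     result = []
--     for i in range(0, len(array) - size + 1, size):
--         bits = []
--         for j in range(bitgroup):
--             ones = sum(1 for b in array[i + j * n: i + j * n + n] if b == '1')
--             bits.append('1' if 2 * ones > n else '0')
--         result.append(''.join(bits))
--     return result
-- ===== Notes on version B (the rewrite author's own statement) =====
-- stated objective: alternative
-- what changed: Replaced A's two sequential stateful passes (bit-counting with running ones/count registers, then regrouping the intermediate bit list with string/counter registers) by one fused nested traversal over super-blocks of n*bitgroup elements that slices each block into its n-sized sub-chunks directly, with no intermediate list and no running state.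
import Mathlib
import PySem

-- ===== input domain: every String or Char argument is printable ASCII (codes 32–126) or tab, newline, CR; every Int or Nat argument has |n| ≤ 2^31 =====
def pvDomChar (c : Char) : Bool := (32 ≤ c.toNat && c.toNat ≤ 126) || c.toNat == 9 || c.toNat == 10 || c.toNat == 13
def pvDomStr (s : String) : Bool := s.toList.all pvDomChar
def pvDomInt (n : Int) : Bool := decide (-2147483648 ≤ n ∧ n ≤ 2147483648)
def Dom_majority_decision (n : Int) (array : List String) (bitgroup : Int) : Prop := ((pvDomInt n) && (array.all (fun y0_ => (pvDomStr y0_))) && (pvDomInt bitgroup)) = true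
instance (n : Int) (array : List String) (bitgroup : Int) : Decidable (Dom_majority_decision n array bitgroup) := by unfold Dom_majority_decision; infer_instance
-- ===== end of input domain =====

-- B replaces A's two sequential stateful passes by one fused nested pass over
-- super-blocks of n*bitgroup elements (alternative decomposition, same cost).

-- ===== PORT A =====
-- Literal port of A.  Python's `ones > n / 2` (true float division of ints) is ported
-- as `2 * b > n`, which is exact for integers in the stated domain; the string
-- accumulator `st` is carried as a List Char and materialised with String.ofList
-- when appended (exact: Python string concatenation is concatenation of characters).
def majority_decision (n : Int) (array : List String) (bitgroup : Int) : List String :=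
  let s1 := array.foldl
    (fun (st : List String × Int × Int) bit =>
      let b := if bit == "1" then st.2.1 + 1 else st.2.1
      let c := st.2.2 + 1
      if c = n then (st.1 ++ [if 2 * b > n then "1" else "0"], 0, 0)
      else (st.1, b, c))
    ([], 0, 0)
  let s2 := s1.1.foldl
    (fun (st : List String × List Char × Int) out =>
      let b := st.2.1 ++ out.toList
      let c := st.2.2 + 1
      if c = bitgroup then (st.1 ++ [String.ofList b], [], 0)
      else (st.1, b, c))
    ([], [], 0)
  s2.1

-- ===== PORT B =====
-- Literal port of B (Source B): guard, then one fused nested pass over super-blocks.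
def majority_decision_alt (n : Int) (array : List String) (bitgroup : Int) : List String :=
  if n ≤ 0 ∨ bitgroup ≤ 0 then []
  else
    let size := n * bitgroup
    (PySem.List.pyRange 0 ((array.length : Int) - size + 1) size).foldl
      (fun result i =>
        let bits := (PySem.List.pyRange 0 bitgroup 1).foldl
          (fun bits j =>
            let ones := (PySem.List.slice array (some (i + j * n)) (some (i + j * n + n))).foldl
              (fun c b => if b == "1" then c + 1 else c) (0 : Int)
            bits ++ [if 2 * ones > n then "1" else "0"])
          []
        result ++ [PySem.Str.join "" bits])
      []

-- ===== PRECONDITION & SPEC =====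
def Spec_majority_decision (n : Int) (array : List String) (bitgroup : Int) (out : List String) : Prop := out = majority_decision_alt n array bitgroup
instance (n : Int) (array : List String) (bitgroup : Int) (out : List String) : Decidable (Spec_majority_decision n array bitgroup out) := by unfold Spec_majority_decision; infer_instance

-- ===== CLAIM (what is proved, stated in full; the proofs are below) =====
def Claim_equal_majority_decision : Prop := ∀ (n : Int) (array : List String) (bitgroup : Int), Dom_majority_decision n array bitgroup → Spec_majority_decision n array bitgroup (majority_decision n array bitgroup)

-- ===== LEMMAS AND PROOFS =====

-- Chunking specification: split a list into consecutive blocks of m, dropping the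
-- trailing partial block.
def pvChunks {α : Type} (m : Nat) (xs : List α) : List (List α) :=
  if _h : m = 0 ∨ xs.length < m then [] else xs.take m :: pvChunks m (xs.drop m)
termination_by xs.length
decreasing_by simp only [List.length_drop]; omega

theorem pvChunks_nil {α : Type} (m : Nat) (xs : List α) (h : m = 0 ∨ xs.length < m) :
    pvChunks m xs = [] := by
  rw [pvChunks]; exact dif_pos h

theorem pvChunks_cons {α : Type} (m : Nat) (xs : List α) (h1 : m ≠ 0) (h2 : m ≤ xs.length) :
    pvChunks m xs = xs.take m :: pvChunks m (xs.drop m) := by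
  rw [pvChunks]; exact dif_neg (by omega)

-- Both of A's loops are a "chunked fold": accumulate with f, emit every n-th element,
-- drop the trailing partial chunk.  These three lemmas characterise that loop shape.
theorem pvFold_no {α β γ : Type} (n : Int) (f : β → α → β) (i0 : β) (emit : β → γ)
    (step : List γ × β × Int → α → List γ × β × Int)
    (hstep : ∀ st x, step st x =
      if st.2.2 + 1 = n then (st.1 ++ [emit (f st.2.1 x)], i0, 0)
      else (st.1, f st.2.1 x, st.2.2 + 1)) :
    ∀ (xs : List α) (acc : List γ) (b : β) (c : Int),
      0 ≤ c → ((c + xs.length < n) ∨ n ≤ c) →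
      (xs.foldl step (acc, b, c)).1 = acc := by
  intro xs
  induction xs with
  | nil => intro acc b c _ _; rfl
  | cons x t ih =>
    intro acc b c hc hlt
    simp only [List.length_cons] at hlt
    have hne : ¬ (c + 1 = n) := by
      rcases hlt with h | h
      · push_cast at h; omega
      · omega
    rw [List.foldl_cons, hstep, if_neg hne]
    exact ih acc (f b x) (c + 1) (by omega)
      (by rcases hlt with h | h
          · left; push_cast at h ⊢; omega
          · right; omega)

theorem pvFold_complete {α β γ : Type} (n : Int) (f : β → α → β) (i0 : β) (emit : β → γ)
    (step : List γ × β × Int → α → List γ × β × Int)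
    (hstep : ∀ st x, step st x =
      if st.2.2 + 1 = n then (st.1 ++ [emit (f st.2.1 x)], i0, 0)
      else (st.1, f st.2.1 x, st.2.2 + 1)) :
    ∀ (k : Nat) (xs : List α) (acc : List γ) (b : β) (c : Int),
      1 ≤ k → k ≤ xs.length → c + k = n →
      xs.foldl step (acc, b, c) =
        (xs.drop k).foldl step (acc ++ [emit ((xs.take k).foldl f b)], i0, 0) := by
  intro k
  induction k with
  | zero => intro xs acc b c h1 _ _; omega
  | succ k ih =>
    intro xs acc b c _ hk hc
    cases xs with
    | nil => simp at hk
    | cons x t =>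
      by_cases hk0 : k = 0
      · subst hk0
        rw [List.foldl_cons, hstep, if_pos (by push_cast at hc ⊢; omega)]
        simp
      · have hne : ¬ (c + 1 = n) := by push_cast at hc; omega
        rw [List.foldl_cons, hstep, if_neg hne]
        rw [ih t acc (f b x) (c + 1) (by omega)
            (by simp only [List.length_cons] at hk; omega) (by push_cast at hc ⊢; omega)]
        simp [List.take_succ_cons, List.drop_succ_cons]

theorem pvFold_chunks {α β γ : Type} (n : Int) (hn : 1 ≤ n) (f : β → α → β) (i0 : β)
    (emit : β → γ) (step : List γ × β × Int → α → List γ × β × Int)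
    (hstep : ∀ st x, step st x =
      if st.2.2 + 1 = n then (st.1 ++ [emit (f st.2.1 x)], i0, 0)
      else (st.1, f st.2.1 x, st.2.2 + 1)) :
    ∀ (N : Nat) (xs : List α), xs.length ≤ N → ∀ (acc : List γ),
      (xs.foldl step (acc, i0, 0)).1 =
        acc ++ (pvChunks n.toNat xs).map (fun ch => emit (ch.foldl f i0)) := by
  intro N
  induction N with
  | zero =>
    intro xs hxs acc
    rw [pvChunks_nil _ _ (Or.inr (by omega)), List.map_nil, List.append_nil]
    exact pvFold_no n f i0 emit step hstep xs acc i0 0 le_rfl (Or.inl (by omega))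
  | succ N ihN =>
    intro xs hxs acc
    by_cases hlen : xs.length < n.toNat
    · rw [pvChunks_nil _ _ (Or.inr hlen), List.map_nil, List.append_nil]
      exact pvFold_no n f i0 emit step hstep xs acc i0 0 le_rfl (Or.inl (by omega))
    · push_neg at hlen
      rw [pvFold_complete n f i0 emit step hstep n.toNat xs acc i0 0 (by omega) hlen (by omega)]
      rw [ihN (xs.drop n.toNat) (by simp only [List.length_drop]; omega)]
      rw [pvChunks_cons _ _ (by omega) hlen, List.map_cons]
      simp

-- pvChunks as an indexed family of drop/take windows.
theorem pvChunks_eq_range {α : Type} (m : Nat) (hm : m ≠ 0) :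
    ∀ (N : Nat) (xs : List α), xs.length ≤ N →
      pvChunks m xs = (List.range (xs.length / m)).map (fun q => (xs.drop (q * m)).take m) := by
  intro N
  induction N with
  | zero =>
    intro xs hxs
    rw [pvChunks_nil _ _ (Or.inr (by omega)), Nat.div_eq_of_lt (by omega), List.range_zero,
      List.map_nil]
  | succ N ihN =>
    intro xs hxs
    by_cases hlen : xs.length < m
    · rw [pvChunks_nil _ _ (Or.inr hlen), Nat.div_eq_of_lt hlen, List.range_zero, List.map_nil]
    · push_neg at hlen
      rw [pvChunks_cons _ _ hm hlen, Nat.div_eq_sub_div (by omega) hlen,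
        List.range_succ_eq_map, List.map_cons, List.map_map]
      rw [ihN (xs.drop m) (by simp only [List.length_drop]; omega)]
      simp only [List.length_drop]
      congr 1
      · simp
      · refine List.map_congr_left (fun q _ => ?_)
        simp only [Function.comp_apply, List.drop_drop, Nat.succ_mul]
        rw [Nat.add_comm]

theorem pvChunks_length {α : Type} (m : Nat) (hm : m ≠ 0) (xs : List α) :
    (pvChunks m xs).length = xs.length / m := by
  rw [pvChunks_eq_range m hm xs.length xs le_rfl]; simp

theorem pvChunks_map {α β : Type} (f : α → β) (m : Nat) :
    ∀ (N : Nat) (l : List α), l.length ≤ N →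
      pvChunks m (l.map f) = (pvChunks m l).map (List.map f) := by
  intro N
  induction N with
  | zero =>
    intro l hl
    rw [pvChunks_nil, pvChunks_nil, List.map_nil]
    · rcases Nat.eq_zero_or_pos m with h | h
      · exact Or.inl h
      · exact Or.inr (by omega)
    · rcases Nat.eq_zero_or_pos m with h | h
      · exact Or.inl h
      · exact Or.inr (by simp; omega)
  | succ N ihN =>
    intro l hl
    by_cases h : m = 0 ∨ l.length < m
    · rw [pvChunks_nil _ _ h, pvChunks_nil, List.map_nil]
      rcases h with h | h
      · exact Or.inl h
      · exact Or.inr (by simpa using h)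
    · push_neg at h
      rw [pvChunks_cons _ _ h.1 (by simpa using h.2), pvChunks_cons _ _ h.1 h.2,
        List.map_cons, ← List.map_take, ← List.map_drop,
        ihN (l.drop m) (by simp only [List.length_drop]; omega)]

theorem pvChunks_append_left {α : Type} (m : Nat) (hm : m ≠ 0) (ys t : List α)
    (h : ys.length = m) : pvChunks m (ys ++ t) = ys :: pvChunks m t := by
  rw [pvChunks_cons _ _ hm (by simp [h]), List.take_left' h, List.drop_left' h]

theorem pvChunks_split {α : Type} (m : Nat) (hm : m ≠ 0) :
    ∀ (q : Nat) (xs : List α), m * q ≤ xs.length →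
      pvChunks m xs = pvChunks m (xs.take (m * q)) ++ pvChunks m (xs.drop (m * q)) := by
  intro q
  induction q with
  | zero =>
    intro xs _
    rw [Nat.mul_zero, List.take_zero, List.drop_zero,
      pvChunks_nil m ([] : List α) (Or.inr (by simpa using Nat.pos_of_ne_zero hm)),
      List.nil_append]
  | succ q ihq =>
    intro xs hq
    have hm_le : m ≤ xs.length := by nlinarith [Nat.one_le_iff_ne_zero.mpr hm]
    rw [pvChunks_cons _ _ hm hm_le]
    rw [pvChunks_cons m (xs.take (m * (q + 1))) hm (by simp; constructor <;> nlinarith)]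
    rw [List.take_take, min_eq_left (by nlinarith), List.drop_take]
    have harith : m * (q + 1) - m = m * q := by ring_nf; omega
    rw [harith, ihq (xs.drop m) (by simp only [List.length_drop]; omega), List.drop_drop]
    rw [show m + m * q = m * (q + 1) from by ring, List.cons_append]

theorem pvChunks_mul {α : Type} (n' g' : Nat) (hn : n' ≠ 0) (hg : g' ≠ 0) :
    ∀ (N : Nat) (xs : List α), xs.length ≤ N →
      pvChunks g' (pvChunks n' xs) = (pvChunks (n' * g') xs).map (pvChunks n') := by
  intro N
  induction N with
  | zero =>
    intro xs hxs
    have hx : xs.length = 0 := by omega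
    rw [pvChunks_nil (n' * g') xs
        (Or.inr (by rw [hx]; exact Nat.pos_of_ne_zero (Nat.mul_ne_zero hn hg))), List.map_nil]
    apply pvChunks_nil
    exact Or.inr (by rw [pvChunks_length n' hn, hx]; simpa using Nat.pos_of_ne_zero hg)
  | succ N ihN =>
    intro xs hxs
    by_cases hlen : xs.length < n' * g'
    · rw [pvChunks_nil (n' * g') xs (Or.inr hlen), List.map_nil, pvChunks_nil]
      refine Or.inr ?_
      rw [pvChunks_length n' hn]
      exact (Nat.div_lt_iff_lt_mul (Nat.pos_of_ne_zero hn)).mpr (by rw [Nat.mul_comm]; exact hlen)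
    · push_neg at hlen
      rw [pvChunks_split n' hn g' xs hlen]
      have hhead : (pvChunks n' (xs.take (n' * g'))).length = g' := by
        rw [pvChunks_length n' hn]
        rw [List.length_take, min_eq_left hlen, Nat.mul_div_cancel_left _ (Nat.pos_of_ne_zero hn)]
      rw [pvChunks_append_left g' hg _ _ hhead]
      rw [pvChunks_cons (n' * g') xs (Nat.mul_ne_zero hn hg) hlen, List.map_cons]
      rw [ihN (xs.drop (n' * g'))
          (by have := Nat.pos_of_ne_zero (Nat.mul_ne_zero hn hg)
              simp only [List.length_drop]; omega)]

-- Chars.join with an empty separator is flatten.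
theorem pvJoin_empty (ls : List (List Char)) : PySem.Chars.join [] ls = ls.flatten := by
  induction ls with
  | nil => simp [PySem.Chars.join, List.intercalate]
  | cons x t ih =>
    cases t with
    | nil => simp [PySem.Chars.join, List.intercalate]
    | cons y u =>
      simp only [PySem.Chars.join, List.intercalate, List.intersperse] at ih ⊢
      simp only [List.flatten_cons, List.nil_append] at ih ⊢
      rw [ih]

-- A's string-building fold equals Python's "".join.
theorem pvOfList_eq_join (grp : List String) :
    String.ofList (grp.foldl (fun s out => s ++ out.toList) []) = PySem.Str.join "" grp := by
  apply String.toList_inj.mp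
  rw [PySem.List.foldl_append_eq_flatMap String.toList grp []]
  simp [PySem.Str.toList_join, pvJoin_empty, List.flatMap_def]

-- Characterisation of A's first loop.
theorem pvA_phase1 (n : Int) (hn : 1 ≤ n) (array : List String) :
    (array.foldl
      (fun (st : List String × Int × Int) bit =>
        if st.2.2 + 1 = n then
          (st.1 ++ [if 2 * (if bit == "1" then st.2.1 + 1 else st.2.1) > n then "1" else "0"],
            0, 0)
        else (st.1, if bit == "1" then st.2.1 + 1 else st.2.1, st.2.2 + 1)) ([], 0, 0)).1
    = (pvChunks n.toNat array).map (fun ch =>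
        if 2 * (ch.foldl (fun a b => if b == "1" then a + 1 else a) 0) > n then "1" else "0") := by
  simpa using pvFold_chunks n hn (fun a b => if b == "1" then a + 1 else a) 0
    (fun b => if 2 * b > n then "1" else "0")
    (fun (st : List String × Int × Int) bit =>
      if st.2.2 + 1 = n then
        (st.1 ++ [if 2 * (if bit == "1" then st.2.1 + 1 else st.2.1) > n then "1" else "0"],
          0, 0)
      else (st.1, if bit == "1" then st.2.1 + 1 else st.2.1, st.2.2 + 1))
    (fun _ _ => rfl) array.length array le_rfl []

-- Characterisation of A's second loop.
theorem pvA_phase2 (bitgroup : Int) (hg : 1 ≤ bitgroup) (ys : List String) :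
    (ys.foldl
      (fun (st : List String × List Char × Int) out =>
        if st.2.2 + 1 = bitgroup then (st.1 ++ [String.ofList (st.2.1 ++ out.toList)], [], 0)
        else (st.1, st.2.1 ++ out.toList, st.2.2 + 1)) ([], [], 0)).1
    = (pvChunks bitgroup.toNat ys).map (fun grp =>
        String.ofList (grp.foldl (fun s out => s ++ out.toList) [])) := by
  simpa using pvFold_chunks bitgroup hg (fun s out => s ++ out.toList) ([] : List Char)
    String.ofList
    (fun (st : List String × List Char × Int) out =>
      if st.2.2 + 1 = bitgroup then (st.1 ++ [String.ofList (st.2.1 ++ out.toList)], [], 0)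
      else (st.1, st.2.1 ++ out.toList, st.2.2 + 1))
    (fun _ _ => rfl) ys.length ys le_rfl []

-- The common normal form both programs reach in the main case.
def pvNF (n : Int) (array : List String) (bitgroup : Int) : List String :=
  (List.range (array.length / (n.toNat * bitgroup.toNat))).map (fun q =>
    PySem.Str.join "" ((List.range bitgroup.toNat).map (fun j =>
      if 2 * (((array.drop (q * (n.toNat * bitgroup.toNat) + j * n.toNat)).take n.toNat).foldl
          (fun a b => if b == "1" then a + 1 else a) 0) > n then "1" else "0")))

theorem pvA_char (n : Int) (array : List String) (bitgroup : Int)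
    (hn : 1 ≤ n) (hg : 1 ≤ bitgroup) :
    majority_decision n array bitgroup = pvNF n array bitgroup := by
  have hn' : n.toNat ≠ 0 := by omega
  have hg' : bitgroup.toNat ≠ 0 := by omega
  simp only [majority_decision]
  rw [pvA_phase1 n hn array, pvA_phase2 bitgroup hg]
  rw [pvChunks_map _ bitgroup.toNat (pvChunks n.toNat array).length _ le_rfl]
  rw [pvChunks_mul n.toNat bitgroup.toNat hn' hg' array.length array le_rfl]
  rw [List.map_map, List.map_map]
  rw [pvChunks_eq_range (n.toNat * bitgroup.toNat) (Nat.mul_ne_zero hn' hg')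
      array.length array le_rfl]
  rw [List.map_map]
  unfold pvNF
  refine List.map_congr_left (fun q hq => ?_)
  rw [List.mem_range] at hq
  simp only [Function.comp_apply]
  rw [pvOfList_eq_join]
  congr 1
  have hblk_ge : q * (n.toNat * bitgroup.toNat) + (n.toNat * bitgroup.toNat) ≤ array.length := by
    calc q * (n.toNat * bitgroup.toNat) + (n.toNat * bitgroup.toNat)
        = (q + 1) * (n.toNat * bitgroup.toNat) := by ring
      _ ≤ (array.length / (n.toNat * bitgroup.toNat)) * (n.toNat * bitgroup.toNat) :=
          Nat.mul_le_mul_right _ hq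
      _ ≤ array.length := Nat.div_mul_le_self _ _
  have hblk : ((array.drop (q * (n.toNat * bitgroup.toNat))).take
      (n.toNat * bitgroup.toNat)).length = n.toNat * bitgroup.toNat := by
    simp only [List.length_take, List.length_drop]; omega
  rw [pvChunks_eq_range n.toNat hn' _ _ le_rfl, hblk,
    Nat.mul_div_cancel_left _ (Nat.pos_of_ne_zero hn')]
  rw [List.map_map]
  refine List.map_congr_left (fun j hj => ?_)
  rw [List.mem_range] at hj
  simp only [Function.comp_apply]
  have hch : (((array.drop (q * (n.toNat * bitgroup.toNat))).take
        (n.toNat * bitgroup.toNat)).drop (j * n.toNat)).take n.toNat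
      = (array.drop (q * (n.toNat * bitgroup.toNat) + j * n.toNat)).take n.toNat := by
    rw [List.drop_take, List.take_take, List.drop_drop]
    have hle : n.toNat + j * n.toNat ≤ n.toNat * bitgroup.toNat := by
      have : (j + 1) * n.toNat ≤ bitgroup.toNat * n.toNat := Nat.mul_le_mul_right _ hj
      nlinarith
    rw [min_eq_left (by omega)]
  rw [hch]

theorem pvB_char (n : Int) (array : List String) (bitgroup : Int)
    (hn : 1 ≤ n) (hg : 1 ≤ bitgroup) :
    majority_decision_alt n array bitgroup = pvNF n array bitgroup := by
  have hn0 : (0 : Int) ≤ n := by omega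
  have hg0 : (0 : Int) ≤ bitgroup := by omega
  have hni : n = (n.toNat : Int) := (Int.toNat_of_nonneg hn0).symm
  have hnb : n * bitgroup = ((n.toNat * bitgroup.toNat : Nat) : Int) := by
    push_cast [Int.toNat_of_nonneg hn0, Int.toNat_of_nonneg hg0]
    ring
  simp only [majority_decision_alt]
  rw [if_neg (by omega)]
  simp only [PySem.List.foldl_append_singleton_eq_map, List.nil_append]
  rw [PySem.List.pyRange_of_pos 0 ((array.length : Int) - n * bitgroup + 1)
      (by nlinarith : (0 : Int) < n * bitgroup)]
  simp only [PySem.List.pyRange_one, List.map_map]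
  have hKcnt : (if (0 : Int) < (array.length : Int) - n * bitgroup + 1 then
        (((array.length : Int) - n * bitgroup + 1 - 0 + n * bitgroup - 1) /
          (n * bitgroup)).toNat else 0)
      = array.length / (n.toNat * bitgroup.toNat) := by
    split_ifs with h
    · rw [show (array.length : Int) - n * bitgroup + 1 - 0 + n * bitgroup - 1
          = (array.length : Int) from by ring, hnb]
      rw [show ((array.length : Int) / ((n.toNat * bitgroup.toNat : Nat) : Int))
          = ((array.length / (n.toNat * bitgroup.toNat) : Nat) : Int) from
          (Int.natCast_div _ _).symm]
      exact Int.toNat_natCast _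
    · rw [hnb] at h
      symm
      apply Nat.div_eq_of_lt
      omega
  rw [hKcnt]
  unfold pvNF
  refine List.map_congr_left (fun k hk => ?_)
  rw [List.mem_range] at hk
  simp only [Function.comp_apply, zero_add, Int.sub_zero]
  congr 1
  refine List.map_congr_left (fun j hj => ?_)
  rw [List.mem_range] at hj
  simp only [Function.comp_apply]
  have hidx : n * bitgroup * (k : Int) + (j : Int) * n
      = ((k * (n.toNat * bitgroup.toNat) + j * n.toNat : Nat) : Int) := by
    push_cast [Int.toNat_of_nonneg hn0, Int.toNat_of_nonneg hg0]
    ring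
  rw [hidx, show ((k * (n.toNat * bitgroup.toNat) + j * n.toNat : Nat) : Int) + n
      = ((k * (n.toNat * bitgroup.toNat) + j * n.toNat : Nat) : Int) + ((n.toNat : Nat) : Int)
      from by rw [← hni], PySem.List.slice_natCast_add]

-- ===== VERDICT (by name: the statement is the Claim_ definition above) =====
theorem majority_decision_spec : Claim_equal_majority_decision := by
  intro n array bitgroup _
  unfold Spec_majority_decision
  by_cases hn : 1 ≤ n
  · by_cases hg : 1 ≤ bitgroup
    · rw [pvA_char n array bitgroup hn hg, pvB_char n array bitgroup hn hg]
    · unfold majority_decision_alt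
      rw [if_pos (Or.inr (by omega))]
      simp only [majority_decision]
      rw [pvFold_no bitgroup (fun (s : List Char) (out : String) => s ++ out.toList) []
          String.ofList
          (fun (st : List String × List Char × Int) out =>
            if st.2.2 + 1 = bitgroup then (st.1 ++ [String.ofList (st.2.1 ++ out.toList)], [], 0)
            else (st.1, st.2.1 ++ out.toList, st.2.2 + 1))
          (fun _ _ => rfl) _ [] [] 0 le_rfl (Or.inr (by omega))]
  · unfold majority_decision_alt
    rw [if_pos (Or.inl (by omega))]
    simp only [majority_decision]
    rw [pvFold_no n (fun a (b : String) => if b == "1" then a + 1 else a) 0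
        (fun b => if 2 * b > n then "1" else "0")
        (fun (st : List String × Int × Int) bit =>
          if st.2.2 + 1 = n then
            (st.1 ++ [if 2 * (if bit == "1" then st.2.1 + 1 else st.2.1) > n then "1" else "0"],
              0, 0)
          else (st.1, if bit == "1" then st.2.1 + 1 else st.2.1, st.2.2 + 1))
        (fun _ _ => rfl) array [] 0 0 le_rfl (Or.inr (by omega))]
    rfl
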